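-- pv_equiv track=rewrite | github.com/princekeshriabc/multi-service-blog | ib.py | _longest_ngram_matches
-- ===== SOURCE A (Python) =====
-- from typing import List, Sequence, Dict, Optional, Set, Tuple
-- from typing import List, Sequence, Optional, Dict, Any, Tuple
-- from typing import List, Sequence, Optional, Dict, Any, Tuple
-- from typing import List, Sequence, Optional, Tuple, Dict, Any
-- from typing import List, Sequence, Optional, Dict, Any
-- from typing import List, Sequence, Optional, Dict, Any
-- from typing import List, Dict, Tuple
-- from typing import Any, Dict, List, Optional, Sequence
-- from typing import List, Sequence, Optional, Dict, Any, Tuple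
-- from typing import List, Dict, Any, Tuple
--
-- def _longest_ngram_matches(tokens: List[str], keyword_set: set) -> List[str]:
--     """
--     Greedy left-to-right longest ngram matching using keyword_set.
--     tokens: normalized tokens (no punctuation, lowercased).
--     returns: list of matched ngrams (joined by space) in order.
--     """
--     n = len(tokens)
--     i = 0
--     out = []
--     while i < n:
--         matched = False
--         # try longest possible window down to 1
--         for L in range(n - i, 0, -1):
--             ng = " ".join(tokens[i:i+L])
--             if ng in keyword_set:
--                 out.append(ng)
--                 i += L
--                 matched = True
--                 break
--         if not matched:
--             # no keyword match; fall back to single token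
--             out.append(tokens[i])
--             i += 1
--     return out
-- ===== SOURCE B (Python) =====
-- def _longest_ngram_matches(tokens, keyword_set):
--     """Greedy longest ngram matching; single upward incremental scan per position,
--     pruned by the maximum keyword length (no candidate longer than any keyword can match)."""
--     n = len(tokens)
--     maxlen = max(map(len, keyword_set), default=-1)
--     out = []
--     i = 0
--     while i < n:
--         cur = tokens[i]
--         L = 1
--         best = None
--         while True:
--             if len(cur) > maxlen:
--                 break
--             if cur in keyword_set:
--                 best = (L, cur)
--             if i + L >= n:
--                 break
--             cur = cur + " " + tokens[i + L]
--             L += 1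
--         if best is None:
--             out.append(tokens[i])
--             i += 1
--         else:
--             out.append(best[1])
--             i += best[0]
--     return out
-- ===== Notes on version B (the rewrite author's own statement) =====
-- stated objective: faster
-- what changed: Replaces A's per-position downward scan that re-joins every window from scratch by a single upward incremental scan per position that extends the candidate string one token at a time and stops as soon as the candidate is longer than the longest keyword (no longer candidate can be in the set), keeping the last (= longest) match.
import Mathlib
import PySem

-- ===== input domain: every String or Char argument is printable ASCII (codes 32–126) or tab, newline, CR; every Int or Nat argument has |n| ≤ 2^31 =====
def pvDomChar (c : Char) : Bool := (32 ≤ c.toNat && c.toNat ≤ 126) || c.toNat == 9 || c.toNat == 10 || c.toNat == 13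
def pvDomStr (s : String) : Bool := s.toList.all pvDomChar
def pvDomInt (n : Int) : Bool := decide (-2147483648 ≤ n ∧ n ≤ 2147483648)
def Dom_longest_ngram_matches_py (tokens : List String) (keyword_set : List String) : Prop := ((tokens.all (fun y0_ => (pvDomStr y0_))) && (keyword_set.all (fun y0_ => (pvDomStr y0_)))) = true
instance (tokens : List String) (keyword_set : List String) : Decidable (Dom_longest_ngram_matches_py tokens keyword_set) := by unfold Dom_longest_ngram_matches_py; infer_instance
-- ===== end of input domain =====

-- B replaces A's per-position downward scan over re-joined windows by one upward incremental
-- scan pruned at the maximum keyword length (candidates longer than every keyword cannot match).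

-- ===== PORT A =====
-- inner 'for L in range(n - i, 0, -1): ... break' of A
def pvAInner (tokens keyword_set : List String) (i : Int) : List Int → Option (String × Int)
  | [] => none
  | L :: rest =>
    let ng := PySem.Str.join " " (PySem.List.slice tokens (some i) (some (i + L)))
    if PySem.Set.contains keyword_set ng then some (ng, L)
    else pvAInner tokens keyword_set i rest

-- outer 'while i < n' of A; fuel = len(tokens) bounds the iterations (i grows by ≥ 1 each turn)
def pvAGo (tokens keyword_set : List String) : Nat → Int → List String → List String
  | 0, _, out => out
  | fuel + 1, i, out =>
    if i < (tokens.length : Int) then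
      match pvAInner tokens keyword_set i (PySem.List.pyRange ((tokens.length : Int) - i) 0 (-1)) with
      | some (ng, L) => pvAGo tokens keyword_set fuel (i + L) (out ++ [ng])
      | none => pvAGo tokens keyword_set fuel (i + 1) (out ++ [PySem.List.pyGetD tokens i ""])
    else out

def longest_ngram_matches_py (tokens : List String) (keyword_set : List String) : List String :=
  pvAGo tokens keyword_set tokens.length 0 []

-- ===== PORT B =====
-- maxlen = max(map(len, keyword_set), default=-1)
def pvMaxlen (keyword_set : List String) : Int :=
  PySem.List.maxD (keyword_set.map PySem.Str.len) (fun x => x) (-1)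

-- inner 'while True: ... break' of B; fuel = n - i bounds the iterations (breaks once i + L ≥ n);
-- 'cur + " " + tokens[i+L]' is ported as " ".join([cur, tokens[i+L]]) (exact)
def pvBScan (tokens keyword_set : List String) (maxlen n i : Int) :
    Nat → String → Int → Option (Int × String) → Option (Int × String)
  | 0, _, _, best => best
  | fuel + 1, cur, L, best =>
    if maxlen < PySem.Str.len cur then best
    else
      let best' := if PySem.Set.contains keyword_set cur then some (L, cur) else best
      if n ≤ i + L then best'
      else pvBScan tokens keyword_set maxlen n i fuel
        (PySem.Str.join " " [cur, PySem.List.pyGetD tokens (i + L) ""]) (L + 1) best'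

-- outer 'while i < n' of B
def pvBGo (tokens keyword_set : List String) (maxlen n : Int) : Nat → Int → List String → List String
  | 0, _, out => out
  | fuel + 1, i, out =>
    if i < n then
      match pvBScan tokens keyword_set maxlen n i (n - i).toNat (PySem.List.pyGetD tokens i "") 1 none with
      | none => pvBGo tokens keyword_set maxlen n fuel (i + 1) (out ++ [PySem.List.pyGetD tokens i ""])
      | some (L, ng) => pvBGo tokens keyword_set maxlen n fuel (i + L) (out ++ [ng])
    else out

def longest_ngram_matches_py_alt (tokens : List String) (keyword_set : List String) : List String :=
  pvBGo tokens keyword_set (pvMaxlen keyword_set) (tokens.length : Int) tokens.length 0 []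

-- ===== PRECONDITION & SPEC =====
def Spec_longest_ngram_matches_py (tokens : List String) (keyword_set : List String) (out : List String) : Prop := out = longest_ngram_matches_py_alt tokens keyword_set
instance (tokens : List String) (keyword_set : List String) (out : List String) : Decidable (Spec_longest_ngram_matches_py tokens keyword_set out) := by unfold Spec_longest_ngram_matches_py; infer_instance

-- ===== CLAIM (what is proved, stated in full; the proofs are below) =====
def Claim_equal_longest_ngram_matches_py : Prop := ∀ (tokens : List String) (keyword_set : List String), Dom_longest_ngram_matches_py tokens keyword_set → Spec_longest_ngram_matches_py tokens keyword_set (longest_ngram_matches_py tokens keyword_set)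

-- ===== LEMMAS AND PROOFS =====

-- the candidate ngram at position i with window length L (both sides compute it)
def pvCand (tokens : List String) (i L : Nat) : String :=
  PySem.Str.join " " ((tokens.drop i).take L)

def pvP (tokens keyword_set : List String) (i L : Nat) : Bool :=
  PySem.Set.contains keyword_set (pvCand tokens i L)

-- the largest L in [1..m] whose candidate matches (what both inner loops compute)
def pvSpecF (P : Nat → Bool) : Nat → Option Nat
  | 0 => none
  | m + 1 => if P (m + 1) then some (m + 1) else pvSpecF P m

theorem pv_join_append_singleton (sep : List Char) (ps : List (List Char)) (q : List Char) (h : ps ≠ []) :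
    PySem.Chars.join sep (ps ++ [q]) = PySem.Chars.join sep ps ++ sep ++ q := by
  induction ps with
  | nil => simp at h
  | cons p rest ih =>
    cases rest with
    | nil => simp [PySem.Chars.join_cons_cons, PySem.Chars.join_singleton]
    | cons r rs =>
      rw [List.cons_append, List.cons_append, PySem.Chars.join_cons_cons,
        ← List.cons_append, ih (by simp), PySem.Chars.join_cons_cons]
      simp

theorem pvCand_one (tokens : List String) (i : Nat) (h : i < tokens.length) :
    pvCand tokens i 1 = PySem.List.pyGetD tokens (i : Int) "" := by
  apply String.toList_inj.mp
  rw [PySem.List.pyGetD_natCast]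
  have hd : (tokens.drop i).take 1 = [tokens[i]] := by
    rw [List.drop_eq_getElem_cons h, List.take_succ_cons, List.take_zero]
  rw [pvCand, hd, PySem.Str.toList_join]
  simp [PySem.Chars.join_singleton, List.getD_eq_getElem?_getD, List.getElem?_eq_getElem h]

theorem pvCand_succ (tokens : List String) (i a : Nat) (h1 : 1 ≤ a) (h2 : i + a < tokens.length) :
    PySem.Str.join " " [pvCand tokens i a, PySem.List.pyGetD tokens ((i : Int) + (a : Int)) ""]
      = pvCand tokens i (a + 1) := by
  apply String.toList_inj.mp
  have hcast : (i : Int) + (a : Int) = ((i + a : Nat) : Int) := by push_cast; ring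
  rw [hcast, PySem.List.pyGetD_natCast]
  have htake : (tokens.drop i).take (a + 1) = (tokens.drop i).take a ++ [tokens[i + a]] := by
    rw [List.take_add_one]
    have : (tokens.drop i)[a]? = some tokens[i + a] := by
      rw [List.getElem?_drop]
      exact List.getElem?_eq_getElem h2
    simp [this]
  have hne : (tokens.drop i).take a ≠ [] := by
    intro hc
    have := congrArg List.length hc
    simp at this
    omega
  rw [pvCand, pvCand, htake, PySem.Str.toList_join, PySem.Str.toList_join, List.map_append]
  simp only [List.map_cons, List.map_nil]
  rw [pv_join_append_singleton _ _ _ (by simpa using hne)]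
  rw [PySem.Chars.join_cons_cons, PySem.Chars.join_singleton, PySem.Str.toList_join]
  simp [List.getD_eq_getElem?_getD, List.getElem?_eq_getElem h2]

theorem pvCand_len_mono (tokens : List String) (i a b : Nat) (h1 : 1 ≤ a) (h2 : a ≤ b)
    (h3 : i + b ≤ tokens.length) :
    PySem.Str.len (pvCand tokens i a) ≤ PySem.Str.len (pvCand tokens i b) := by
  induction b with
  | zero => omega
  | succ b ih =>
    rcases Nat.lt_or_ge a (b + 1) with hab | hab
    · have hb1 : 1 ≤ b := by omega
      have hib : i + b < tokens.length := by omega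
      have := ih (by omega) (by omega)
      refine le_trans this ?_
      rw [← pvCand_succ tokens i b hb1 hib]
      rw [PySem.Str.len_eq, PySem.Str.len_eq, PySem.Str.toList_join]
      simp only [List.map_cons, List.map_nil]
      rw [PySem.Chars.join_cons_cons, PySem.Chars.join_singleton]
      simp
      positivity
    · have : a = b + 1 := by omega
      subst this
      exact le_refl _

theorem pv_len_le_maxlen (keyword_set : List String) (s : String)
    (h : PySem.Set.contains keyword_set s = true) :
    PySem.Str.len s ≤ pvMaxlen keyword_set := by
  have hmem : s ∈ keyword_set := (PySem.Set.contains_iff _ _).mp h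
  exact PySem.List.le_maxD_id _ _ _ (List.mem_map_of_mem hmem)

theorem pvSpecF_stable (P : Nat → Bool) (a m : Nat) (h : a ≤ m)
    (hno : ∀ L, a < L → L ≤ m → P L = false) :
    pvSpecF P m = pvSpecF P a := by
  induction m with
  | zero =>
    have : a = 0 := by omega
    subst this; rfl
  | succ m ih =>
    rcases Nat.lt_or_ge a (m + 1) with hlt | hge
    · rw [pvSpecF, hno (m + 1) hlt (le_refl _)]
      simp only [Bool.false_eq_true, if_false]
      exact ih (by omega) (fun L hL1 hL2 => hno L hL1 (by omega))
    · have : a = m + 1 := by omega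
      subst this
      rfl

theorem pvAInner_eq (tokens keyword_set : List String) (i m : Nat) :
    pvAInner tokens keyword_set (i : Int) (PySem.List.pyRange (m : Int) 0 (-1))
      = (pvSpecF (pvP tokens keyword_set i) m).map (fun L : Nat => (pvCand tokens i L, (L : Int))) := by
  induction m with
  | zero => rw [PySem.List.pyRange_neg_one_eq_nil (by simp)]; rfl
  | succ m ih =>
    rw [PySem.List.pyRange_neg_one_cons (by positivity)]
    have hc : ((m + 1 : Nat) : Int) - 1 = (m : Nat) := by push_cast; ring
    rw [hc]
    show (if PySem.Set.contains keyword_set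
        (PySem.Str.join " " (PySem.List.slice tokens (some (i:Int)) (some ((i:Int) + ((m+1:Nat):Int)))))
        then some (PySem.Str.join " " (PySem.List.slice tokens (some (i:Int)) (some ((i:Int) + ((m+1:Nat):Int)))), ((m+1:Nat):Int))
        else pvAInner tokens keyword_set (i:Int) (PySem.List.pyRange ((m:Nat):Int) 0 (-1)))
      = _
    rw [PySem.List.slice_natCast_add]
    rw [show PySem.Str.join " " (List.take (m+1) (List.drop i tokens)) = pvCand tokens i (m+1) from rfl]
    rw [pvSpecF]
    simp only [pvP]
    by_cases hP : pvCand tokens i (m + 1) ∈ keyword_set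
    · simp [hP]
    · simp [hP, ih]

theorem pvBScan_eq (tokens keyword_set : List String) (i : Nat) :
    ∀ (fuel a : Nat), i < tokens.length → 1 ≤ a → a ≤ tokens.length - i →
      tokens.length - i + 1 ≤ fuel + a →
    pvBScan tokens keyword_set (pvMaxlen keyword_set) (tokens.length : Int) (i : Int) fuel
        (pvCand tokens i a) (a : Int)
        ((pvSpecF (pvP tokens keyword_set i) (a - 1)).map
          (fun L : Nat => ((L : Int), pvCand tokens i L)))
      = (pvSpecF (pvP tokens keyword_set i) (tokens.length - i)).map
          (fun L : Nat => ((L : Int), pvCand tokens i L)) := by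
  intro fuel
  induction fuel with
  | zero => intro a hi ha ham hfuel; exact absurd ham (by omega)
  | succ fuel ih =>
    intro a hi ha ham hfuel
    rw [pvBScan]
    by_cases hbreak : pvMaxlen keyword_set < PySem.Str.len (pvCand tokens i a)
    · rw [if_pos hbreak]
      have hno : ∀ L, a - 1 < L → L ≤ tokens.length - i → pvP tokens keyword_set i L = false := by
        intro L h1 h2
        cases hPL : pvP tokens keyword_set i L with
        | false => rfl
        | true =>
          exfalso
          have hle : PySem.Str.len (pvCand tokens i L) ≤ pvMaxlen keyword_set :=
            pv_len_le_maxlen keyword_set _ hPL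
          have hmono := pvCand_len_mono tokens i a L ha (by omega) (by omega)
          omega
      rw [pvSpecF_stable _ (a - 1) _ (by omega) hno]
    · rw [if_neg hbreak]
      have hsw : pvSpecF (pvP tokens keyword_set i) a
          = if PySem.Set.contains keyword_set (pvCand tokens i a) then some a
            else pvSpecF (pvP tokens keyword_set i) (a - 1) := by
        conv_lhs => rw [show a = (a - 1) + 1 by omega]
        rw [pvSpecF, pvP]
        rw [show a - 1 + 1 = a by omega]
      have hbest : (if PySem.Set.contains keyword_set (pvCand tokens i a) = true
              then some ((a : Int), pvCand tokens i a)
              else (pvSpecF (pvP tokens keyword_set i) (a - 1)).map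
                (fun L : Nat => ((L : Int), pvCand tokens i L)))
          = (pvSpecF (pvP tokens keyword_set i) a).map
              (fun L : Nat => ((L : Int), pvCand tokens i L)) := by
        rw [hsw]
        by_cases hmem : pvCand tokens i a ∈ keyword_set
        · simp [hmem]
        · simp [hmem]
      by_cases hend : (tokens.length : Int) ≤ (i : Int) + (a : Int)
      · have haem : a = tokens.length - i := by omega
        simp only [if_pos hend]
        rw [hbest, haem]
      · simp only [if_neg hend]
        have hcur : PySem.Str.join " "
              [pvCand tokens i a, PySem.List.pyGetD tokens ((i : Int) + (a : Int)) ""]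
            = pvCand tokens i (a + 1) := pvCand_succ tokens i a ha (by omega)
        have hLcast : (a : Int) + 1 = ((a + 1 : Nat) : Int) := by push_cast; ring
        rw [hbest, hcur, hLcast]
        have := ih (a + 1) hi (by omega) (by omega) (by omega)
        rw [show a + 1 - 1 = a from rfl] at this
        exact this

theorem pvGo_eq (tokens keyword_set : List String) (fuel : Nat) :
    ∀ (i : Nat) (out : List String),
      pvAGo tokens keyword_set fuel (i : Int) out
        = pvBGo tokens keyword_set (pvMaxlen keyword_set) (tokens.length : Int) fuel (i : Int) out := by
  induction fuel with
  | zero => intro i out; rfl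
  | succ fuel ih =>
    intro i out
    rw [pvAGo, pvBGo]
    by_cases hi : (i : Int) < (tokens.length : Int)
    · rw [if_pos hi, if_pos hi]
      have hiN : i < tokens.length := by exact_mod_cast hi
      have hrange : (tokens.length : Int) - (i : Int) = ((tokens.length - i : Nat) : Int) := by
        push_cast [Nat.cast_sub (le_of_lt hiN)]; ring
      rw [hrange, pvAInner_eq tokens keyword_set i (tokens.length - i)]
      have htonat : (((tokens.length - i : Nat) : Int)).toNat = tokens.length - i := Int.toNat_natCast _
      have hcur : PySem.List.pyGetD tokens (i : Int) "" = pvCand tokens i 1 :=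
        (pvCand_one tokens i hiN).symm
      have hnone : (none : Option (Int × String))
          = (pvSpecF (pvP tokens keyword_set i) (1 - 1)).map
              (fun L : Nat => ((L : Int), pvCand tokens i L)) := rfl
      rw [htonat, hcur, show (1 : Int) = ((1 : Nat) : Int) from rfl, hnone,
        pvBScan_eq tokens keyword_set i (tokens.length - i) 1 hiN (le_refl 1) (by omega) (by omega)]
      cases hspec : pvSpecF (pvP tokens keyword_set i) (tokens.length - i) with
      | none =>
        simp only [Option.map_none]
        rw [← hcur]
        have : (i : Int) + ((1 : Nat) : Int) = ((i + 1 : Nat) : Int) := by push_cast; ring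
        rw [this, ih (i + 1)]
      | some L =>
        simp only [Option.map_some]
        have : (i : Int) + (L : Int) = ((i + L : Nat) : Int) := by push_cast; ring
        rw [this, ih (i + L)]
    · rw [if_neg hi, if_neg hi]

-- ===== VERDICT (by name: the statement is the Claim_ definition above) =====
theorem longest_ngram_matches_py_spec : Claim_equal_longest_ngram_matches_py := by
  intro tokens keyword_set _
  unfold Spec_longest_ngram_matches_py longest_ngram_matches_py longest_ngram_matches_py_alt
  have h := pvGo_eq tokens keyword_set tokens.length 0 []
  simpa using h
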